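-- pv_equiv track=rewrite | github.com/cirosantilli/project-euler-solvers | solvers/652.py | primitive_count
-- ===== SOURCE A (Python) =====
-- def integer_kth_root(n: int, k: int) -> int:
--     """Return floor(n ** (1/k)) for integers n>=0, k>=1, using binary search (exact)."""
--     if k <= 1:
--         return n
--     if n < 2:
--         return n
--
--     # Upper bound: 2^(ceil(bitlen/k)) is guaranteed >= n^(1/k)
--     high = 1 << ((n.bit_length() + k - 1) // k)
--     low = 1
--     while low + 1 < high:
--         mid = (low + high) // 2
--         if pow(mid, k) <= n:
--             low = mid
--         else:
--             high = mid
--     return low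
--
-- def primitive_count(x: int, mu) -> int:
--     """
--     Count integers u with 2 <= u <= x that are NOT perfect powers.
--
--     Uses Möbius inversion on counts of d-th powers:
--       F(d) = #{ n in [2..x] : n is a d-th power } = floor(x^(1/d)) - 1
--       F(d) = sum_{d|k} G(k), where G(k) is #{ n with maximal power-exponent = k }.
--     Then G(1) = sum_{d>=1} mu(d) * F(d).
--
--     So primitive_count(x) = G(1).
--     """
--     if x < 2:
--         return 0
--     K = x.bit_length() - 1  # floor(log2 x)
--     s = 0
--     for d in range(1, K + 1):
--         md = mu[d]
--         if md == 0:
--             continue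
--         s += md * (integer_kth_root(x, d) - 1)
--     return s
-- ===== SOURCE B (Python) =====
-- def primitive_count(x: int, mu) -> int:
--     if x < 2:
--         return 0
--     K = x.bit_length() - 1
--     s = (x - 1) * mu[1]
--     for d in range(2, K + 1):
--         md = mu[d]
--         if md == 0:
--             continue
--         c = 0
--         b = 2
--         while b ** d <= x:
--             c += 1
--             b += 1
--         s += md * c
--     return s
-- ===== Notes on version B (the rewrite author's own statement) =====
-- stated objective: alternative
-- what changed: Each per-exponent term floor(x^(1/d))-1, obtained in A by a binary-search integer k-th root, is obtained in B by directly counting bases b=2,3,... with b**d <= x; the d=1 term is folded into the accumulator's initial value (x-1)*mu[1].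
import Mathlib
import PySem

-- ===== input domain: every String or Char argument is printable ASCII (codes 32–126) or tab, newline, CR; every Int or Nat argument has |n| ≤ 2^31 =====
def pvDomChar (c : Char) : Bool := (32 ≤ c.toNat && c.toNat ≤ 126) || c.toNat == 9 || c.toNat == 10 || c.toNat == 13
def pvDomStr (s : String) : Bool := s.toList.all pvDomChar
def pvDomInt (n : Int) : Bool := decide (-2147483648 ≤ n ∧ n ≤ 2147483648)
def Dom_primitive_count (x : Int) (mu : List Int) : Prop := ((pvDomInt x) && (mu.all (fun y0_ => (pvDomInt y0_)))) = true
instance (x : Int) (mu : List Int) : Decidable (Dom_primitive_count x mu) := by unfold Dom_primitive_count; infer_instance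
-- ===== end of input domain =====

-- B replaces each binary-search integer root extraction by a direct count of d-th powers
-- (loop over bases b = 2,3,… while b**d ≤ x); same value, no speed claim (objective: alternative).

-- ===== PORT A =====

-- midpoint strictly between low and high (cited by irootLoop's decreasing_by)
theorem pvMidBounds {low high : Int} (h : low + 1 < high) :
    low < PySem.Int.floordiv (low + high) 2 ∧ PySem.Int.floordiv (low + high) 2 < high := by
  constructor
  · have := (PySem.Int.le_floordiv_iff_mul_le (a := low + high) (b := 2) (q := low + 1) (by omega)).mpr (by omega)
    omega
  · exact (PySem.Int.floordiv_lt_iff_lt_mul (a := low + high) (b := 2) (q := high) (by omega)).mpr (by omega)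

-- the 'while low + 1 < high' binary-search loop of integer_kth_root
def irootLoop (n k low high : Int) : Int :=
  if h : low + 1 < high then
    let mid := PySem.Int.floordiv (low + high) 2
    if mid ^ k.toNat ≤ n then irootLoop n k mid high
    else irootLoop n k low mid
  else low
termination_by (high - low).toNat
decreasing_by
  · have := pvMidBounds h; omega
  · have := pvMidBounds h; omega

def integer_kth_root (n k : Int) : Int :=
  if k ≤ 1 then n
  else if n < 2 then n
  else
    irootLoop n k 1
      (1 <<< (PySem.Int.floordiv ((PySem.Int.bitLength n : Int) + k - 1) k).toNat)

def primitive_count (x : Int) (mu : List Int) : Int :=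
  if x < 2 then 0
  else
    let K : Int := (PySem.Int.bitLength x : Int) - 1
    (PySem.List.pyRange 1 (K + 1) 1).foldl (fun s d =>
      let md := PySem.List.pyGetD mu d 0
      if md = 0 then s else s + md * (integer_kth_root x d - 1)) 0

-- ===== PORT B =====

-- the 'while b ** d <= x' counting loop (the 1 ≤ b ∧ 1 ≤ d conjuncts are a totality
-- guard only: every call reaching this loop has b ≥ 2 and d ≥ 2)
def countLoop (x d b c : Int) : Int :=
  if h : b ^ d.toNat ≤ x ∧ 1 ≤ b ∧ 1 ≤ d then countLoop x d (b + 1) (c + 1) else c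
termination_by (x + 1 - b).toNat
decreasing_by
  have hb : b ≤ b ^ d.toNat := le_self_pow₀ h.2.1 (by omega)
  omega

def primitive_count_alt (x : Int) (mu : List Int) : Int :=
  if x < 2 then 0
  else
    let K : Int := (PySem.Int.bitLength x : Int) - 1
    (PySem.List.pyRange 2 (K + 1) 1).foldl (fun s d =>
      let md := PySem.List.pyGetD mu d 0
      if md = 0 then s else s + md * countLoop x d 2 0)
      ((x - 1) * PySem.List.pyGetD mu 1 0)

-- ===== PRECONDITION & SPEC =====
-- Pre_ excludes exactly the inputs where A raises IndexError: x ≥ 2 with mu shorter than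
-- bit_length(x) (A reads mu[1..bit_length(x)-1]).
def Pre_primitive_count (x : Int) (mu : List Int) : Prop :=
  x < 2 ∨ (PySem.Int.bitLength x : Int) ≤ mu.length
instance (x : Int) (mu : List Int) : Decidable (Pre_primitive_count x mu) := by
  unfold Pre_primitive_count; infer_instance

def pvWitness_primitive_count : Int × List Int := (10, [0, 1, -1, -1])

def Spec_primitive_count (x : Int) (mu : List Int) (out : Int) : Prop := out = primitive_count_alt x mu
instance (x : Int) (mu : List Int) (out : Int) : Decidable (Spec_primitive_count x mu out) := by unfold Spec_primitive_count; infer_instance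

-- ===== CLAIM (what is proved, stated in full; the proofs are below) =====
def Claim_equal_primitive_count : Prop := ∀ (x : Int) (mu : List Int), Dom_primitive_count x mu → Pre_primitive_count x mu → Spec_primitive_count x mu (primitive_count x mu)

-- ===== LEMMAS AND PROOFS =====

-- r is the integer k-th root of n
def IsRoot (n k r : Int) : Prop := 1 ≤ r ∧ r ^ k.toNat ≤ n ∧ n < (r + 1) ^ k.toNat

theorem irootLoop_isRoot (n k : Int) : ∀ (m : Nat) (low high : Int), (high - low).toNat = m →
    1 ≤ low → low < high → low ^ k.toNat ≤ n → n < high ^ k.toNat →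
    IsRoot n k (irootLoop n k low high) := by
  intro m
  induction m using Nat.strong_induction_on with
  | _ m ih =>
    intro low high hm hlow hlh hl hh
    rw [irootLoop]
    split
    · next h =>
      have hmid := pvMidBounds h
      set mid := PySem.Int.floordiv (low + high) 2 with hmiddef
      show IsRoot n k (if mid ^ k.toNat ≤ n then irootLoop n k mid high else irootLoop n k low mid)
      split
      · next hp =>
        exact ih (high - mid).toNat (by omega) mid high rfl (by omega) hmid.2 hp hh
      · next hp =>
        exact ih (mid - low).toNat (by omega) low mid rfl hlow hmid.1 hl (by omega)
    · next h =>
      have heq : high = low + 1 := by omega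
      exact ⟨hlow, hl, by rw [← heq]; exact hh⟩

theorem hi_bound (n k : Int) (hk : 2 ≤ k) (hn : 2 ≤ n) :
    let m := PySem.Int.floordiv ((PySem.Int.bitLength n : Int) + k - 1) k
    1 ≤ m ∧ n < ((1 : Int) <<< m.toNat) ^ k.toNat := by
  intro m
  set L : Nat := PySem.Int.bitLength n with hLdef
  have hL2 : 2 ≤ L := by
    by_contra hc
    have h1 : n.natAbs < 2 ^ L := PySem.Int.lt_two_pow_bitLength n
    have : (2:Nat) ^ L ≤ 2 ^ 1 := Nat.pow_le_pow_right (by omega) (by omega)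
    omega
  have hm1 : 1 ≤ m :=
    (PySem.Int.le_floordiv_iff_mul_le (a := (L:Int) + k - 1) (b := k) (q := 1) (by omega)).mpr (by omega)
  refine ⟨hm1, ?_⟩
  have hdm := PySem.Int.floordiv_mul_add_mod ((L:Int) + k - 1) k
  have hmod1 : 0 ≤ PySem.Int.mod ((L:Int) + k - 1) k := PySem.Int.mod_nonneg _ (by omega)
  have hmod2 : PySem.Int.mod ((L:Int) + k - 1) k < k := PySem.Int.mod_lt _ (by omega)
  have hmk : (L : Int) ≤ m * k := by nlinarith
  have hmkN : L ≤ m.toNat * k.toNat := by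
    have : ((m.toNat * k.toNat : Nat) : Int) = m * k := by
      push_cast
      rw [Int.toNat_of_nonneg (by omega), Int.toNat_of_nonneg (by omega)]
    omega
  have h2L : n < (2 : Int) ^ L := by
    have h1 := PySem.Int.lt_two_pow_bitLength n
    calc n = ((n.natAbs : Nat) : Int) := by omega
    _ < ((2 ^ L : Nat) : Int) := by exact_mod_cast h1
    _ = (2 : Int) ^ L := by push_cast; ring
  calc n < (2:Int) ^ L := h2L
  _ ≤ (2:Int) ^ (m.toNat * k.toNat) := by
      apply pow_le_pow_right₀ (by omega) hmkN
  _ = ((1 : Int) <<< m.toNat) ^ k.toNat := by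
      rw [Int.shiftLeft_eq, pow_mul]; ring

theorem integer_kth_root_isRoot (n k : Int) (hk : 2 ≤ k) (hn : 2 ≤ n) :
    IsRoot n k (integer_kth_root n k) := by
  obtain ⟨hm1, hhb⟩ := hi_bound n k hk hn
  unfold integer_kth_root
  rw [if_neg (by omega), if_neg (by omega)]
  apply irootLoop_isRoot n k _ 1 _ rfl le_rfl
  · calc (1:Int) < 2 ^ 1 := by norm_num
    _ ≤ 2 ^ (PySem.Int.floordiv ((PySem.Int.bitLength n : Int) + k - 1) k).toNat :=
        pow_le_pow_right₀ (by omega) (by omega)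
    _ = (1 : Int) <<< (PySem.Int.floordiv ((PySem.Int.bitLength n : Int) + k - 1) k).toNat := by
        rw [Int.shiftLeft_eq]; ring
  · simpa using hn.trans' (by norm_num)
  · exact hhb

theorem countLoop_eq (x d r : Int) (hd : 1 ≤ d) (hr : IsRoot x d r) :
    ∀ (m : Nat) (b c : Int), (r + 1 - b).toNat = m → 1 ≤ b →
    countLoop x d b c = c + max (r + 1 - b) 0 := by
  obtain ⟨hr1, hrl, hrh⟩ := hr
  intro m
  induction m using Nat.strong_induction_on with
  | _ m ih =>
    intro b c hm hb
    rw [countLoop]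
    by_cases hbr : b ≤ r
    · have hg : b ^ d.toNat ≤ x ∧ 1 ≤ b ∧ 1 ≤ d :=
        ⟨le_trans (pow_le_pow_left₀ (by omega) hbr _) hrl, hb, hd⟩
      rw [dif_pos hg]
      rw [ih (r + 1 - (b + 1)).toNat (by omega) (b + 1) (c + 1) rfl (by omega)]
      omega
    · have hg : ¬ (b ^ d.toNat ≤ x ∧ 1 ≤ b ∧ 1 ≤ d) := by
        intro hg
        have h1 : (r + 1) ^ d.toNat ≤ b ^ d.toNat := pow_le_pow_left₀ (by omega) (by omega) _
        omega
      rw [dif_neg hg]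
      omega

theorem term_eq (x d : Int) (hx : 2 ≤ x) (hd : 2 ≤ d) :
    integer_kth_root x d - 1 = countLoop x d 2 0 := by
  have hr := integer_kth_root_isRoot x d hd hx
  have hc := countLoop_eq x d _ (by omega) hr (integer_kth_root x d + 1 - 2).toNat 2 0 rfl (by omega)
  have hr1 := hr.1
  omega

theorem bitLength_two_le (x : Int) (hx : 2 ≤ x) : 2 ≤ PySem.Int.bitLength x := by
  by_contra hc
  have h1 := PySem.Int.lt_two_pow_bitLength x
  have : (2:Nat) ^ PySem.Int.bitLength x ≤ 2 ^ 1 := Nat.pow_le_pow_right (by omega) (by omega)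
  omega

-- ===== VERDICT (by name: the statement is the Claim_ definition above) =====
theorem primitive_count_spec : Claim_equal_primitive_count := by
  intro x mu _ _
  unfold Spec_primitive_count primitive_count primitive_count_alt
  by_cases hx : x < 2
  · rw [if_pos hx, if_pos hx]
  · rw [if_neg hx, if_neg hx]
    have hx2 : 2 ≤ x := by omega
    have hL2 : 2 ≤ PySem.Int.bitLength x := bitLength_two_le x hx2
    set L : Int := (PySem.Int.bitLength x : Int) with hLdef
    show (PySem.List.pyRange 1 (L - 1 + 1) 1).foldl (fun s d =>
        let md := PySem.List.pyGetD mu d 0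
        if md = 0 then s else s + md * (integer_kth_root x d - 1)) 0 =
      (PySem.List.pyRange 2 (L - 1 + 1) 1).foldl (fun s d =>
        let md := PySem.List.pyGetD mu d 0
        if md = 0 then s else s + md * countLoop x d 2 0)
        ((x - 1) * PySem.List.pyGetD mu 1 0)
    rw [PySem.List.pyRange_one_cons (by omega : (1:Int) < L - 1 + 1)]
    simp only [List.foldl_cons]
    have hroot1 : integer_kth_root x 1 = x := by
      unfold integer_kth_root; rw [if_pos (by omega)]
    have hinit :
        (let md := PySem.List.pyGetD mu 1 0;
         if md = 0 then (0:Int) else 0 + md * (integer_kth_root x 1 - 1)) =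
        (x - 1) * PySem.List.pyGetD mu 1 0 := by
      simp only [hroot1]
      by_cases h : PySem.List.pyGetD mu 1 0 = 0
      · simp [h]
      · simp [h]; ring
    rw [hinit]
    apply PySem.List.foldl_congr_mem
    intro s d hd
    have hd2 : 2 ≤ d := (PySem.List.mem_pyRange_one.mp hd).1
    by_cases h : PySem.List.pyGetD mu d 0 = 0
    · simp [h]
    · simp only [h]
      rw [term_eq x d hx2 hd2]
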